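-- pv_equiv track=rewrite | github.com/hyemin21/PPS | 2024_summer/week4/A046_신혜민_20240724.py | problem_1159
-- ===== SOURCE A (Python) =====
-- def problem_1159(names):
--     from collections import defaultdict
--     count = defaultdict(int)
--     for name in names:
--         count[name[0]] += 1
--     result = sorted([char for char in count if count[char] >= 5])
--     if result:
--         return "".join(result)
--     else:
--         return "PREDAJA"
-- ===== SOURCE B (Python) =====
-- from itertools import groupby
--
-- def problem_1159(names):
--     firsts = sorted(name[0] for name in names)
--     res = [c for c, g in groupby(firsts) if len(list(g)) >= 5]
--     return "".join(res) if res else "PREDAJA"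
-- ===== Notes on version B (the rewrite author's own statement) =====
-- stated objective: idiomatic
-- what changed: Replaces the defaultdict histogram plus a final sort of qualifying keys by sorting the first letters once and scanning consecutive runs with itertools.groupby, emitting run letters of length >= 5 already in order.
import Mathlib
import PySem

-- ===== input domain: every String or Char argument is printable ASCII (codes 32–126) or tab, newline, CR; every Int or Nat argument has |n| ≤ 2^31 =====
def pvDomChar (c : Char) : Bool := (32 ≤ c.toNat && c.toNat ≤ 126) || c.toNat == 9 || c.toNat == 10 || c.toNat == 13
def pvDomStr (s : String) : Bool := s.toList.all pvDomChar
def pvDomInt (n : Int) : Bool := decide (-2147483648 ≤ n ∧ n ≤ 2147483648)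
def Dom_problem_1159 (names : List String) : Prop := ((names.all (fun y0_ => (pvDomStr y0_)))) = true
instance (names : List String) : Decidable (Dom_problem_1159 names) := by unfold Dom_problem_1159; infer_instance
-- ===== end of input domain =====

-- B swaps A's defaultdict histogram for sort-then-scan of consecutive runs (itertools.groupby); same cost, more idiomatic.

-- shared accessor for name[0]; under Pre_ (no empty string) pyGet? is always some; ' ' is an arbitrary default
def pvFirst (n : String) : Char :=
  match PySem.Str.pyGet? n 0 with
  | some c => c
  | none => ' '

-- ===== PORT A =====
def problem_1159 (names : List String) : String :=
  let count : PySem.Dict Char Int :=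
    names.foldl (fun d name => d.modify (pvFirst name) 0 (· + 1)) PySem.Dict.empty
  let result : List Char :=
    PySem.List.sorted (count.keys.filter (fun char => decide ((5 : Int) ≤ count.getD char 0))) (fun x => x) false
  if result ≠ [] then String.ofList result else "PREDAJA"

-- ===== PORT B =====
-- groupby over the sorted list: take each maximal run of equal chars, keep its letter if the run length ≥ 5
def pvCollectRuns : List Char → List Char
  | [] => []
  | c :: rest =>
    let run := rest.takeWhile (· == c)
    let rest' := rest.dropWhile (· == c)
    if 5 ≤ run.length + 1 then c :: pvCollectRuns rest' else pvCollectRuns rest'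
termination_by l => l.length
decreasing_by
  all_goals
    have h := List.length_dropWhile_le (fun x => x == c) rest
    simp only [List.length_cons]
    omega

def problem_1159_alt (names : List String) : String :=
  let firsts := PySem.List.sorted (names.map pvFirst) (fun x => x) false
  let res := pvCollectRuns firsts
  if res ≠ [] then String.ofList res else "PREDAJA"

-- ===== PRECONDITION & SPEC =====
-- Pre_ excludes lists containing an empty string: there A (and B) raise IndexError on name[0]
def Pre_problem_1159 (names : List String) : Prop := ∀ n ∈ names, n ≠ ""
instance (names : List String) : Decidable (Pre_problem_1159 names) := by unfold Pre_problem_1159; infer_instance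
def pvWitness_problem_1159 : List String := ["ant", "axe", "arc", "art", "arm", "bee"]

def Spec_problem_1159 (names : List String) (out : String) : Prop := out = problem_1159_alt names
instance (names : List String) (out : String) : Decidable (Spec_problem_1159 names out) := by unfold Spec_problem_1159; infer_instance

-- ===== CLAIM (what is proved, stated in full; the proofs are below) =====
def Claim_equal_problem_1159 : Prop := ∀ (names : List String), Dom_problem_1159 names → Pre_problem_1159 names → Spec_problem_1159 names (problem_1159 names)

-- ===== LEMMAS AND PROOFS =====

-- elements past the leading run of c are strictly greater than c
lemma pv_gt_of_mem_dropWhile (l : List Char) (c : Char)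
    (hs : l.Pairwise (· ≤ ·)) (hge : ∀ x ∈ l, c ≤ x) :
    ∀ x ∈ l.dropWhile (· == c), c < x := by
  induction l with
  | nil => intro x hx; simp at hx
  | cons h t ih =>
    by_cases hc : h = c
    · subst hc
      intro x hx
      rw [List.dropWhile_cons_of_pos (by simp)] at hx
      exact ih (List.Pairwise.sublist (List.sublist_cons_self h t) hs)
        (fun x hx => hge x (List.mem_cons_of_mem _ hx)) x hx
    · intro x hx
      rw [List.dropWhile_cons_of_neg (by simp [hc])] at hx
      have hch : c < h := lt_of_le_of_ne (hge h (List.mem_cons_self)) (Ne.symm hc)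
      rcases List.mem_cons.1 hx with rfl | hxt
      · exact hch
      · exact lt_of_lt_of_le hch (List.rel_of_pairwise_cons hs hxt)

-- key characterisation of the run scan on a sorted list
lemma pvCollectRuns_spec_aux (n : Nat) : ∀ l : List Char, l.length ≤ n → l.Pairwise (· ≤ ·) →
    (pvCollectRuns l).Pairwise (· < ·) ∧ (∀ x, x ∈ pvCollectRuns l ↔ 5 ≤ l.count x) := by
  induction n with
  | zero =>
    intro l hl _
    have : l = [] := List.eq_nil_of_length_eq_zero (Nat.le_zero.1 hl)
    subst this
    simp [pvCollectRuns]
  | succ n ihn =>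
    intro l hl hs
    match l with
    | [] => simp [pvCollectRuns]
    | c :: rest =>
      set run := rest.takeWhile (· == c) with hrundef
      set rest' := rest.dropWhile (· == c) with hrdef
      have hge : ∀ x ∈ rest, c ≤ x := fun x hx => List.rel_of_pairwise_cons hs hx
      have hrest : rest.Pairwise (· ≤ ·) := List.Pairwise.sublist (List.sublist_cons_self c rest) hs
      have hgt : ∀ x ∈ rest', c < x := by
        intro x hx; exact pv_gt_of_mem_dropWhile rest c hrest hge x (by simpa [hrdef] using hx)
      have hsr : rest'.Pairwise (· ≤ ·) :=
        List.Pairwise.sublist (by simpa [hrdef] using List.dropWhile_sublist (l := rest) (p := (· == c))) hrest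
      have hlen : rest'.length ≤ n := by
        rw [hrdef]
        have h1 := List.length_dropWhile_le (fun x => x == c) rest
        have h2 : rest.length + 1 ≤ n + 1 := by simpa using hl
        omega
      obtain ⟨ihp, ihm⟩ := ihn rest' hlen hsr
      have hsplit : rest = run ++ rest' := (List.takeWhile_append_dropWhile).symm
      have hrun_all : ∀ x ∈ run, x = c := by
        intro x hx
        have := List.mem_takeWhile_imp (by simpa [hrundef] using hx)
        simpa using this
      have hcount : ∀ x, (c :: rest).count x = if x = c then run.length + 1 else rest'.count x := by
        intro x
        rw [show (c :: rest) = c :: (run ++ rest') from by rw [← hsplit]]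
        by_cases hxc : x = c
        · subst hxc
          have h1 : run.count x = run.length :=
            List.count_eq_length.2 (fun b hb => ((hrun_all b hb).symm : x = b))
          have h2 : rest'.count x = 0 :=
            List.count_eq_zero.2 (fun hx => lt_irrefl x (hgt x hx))
          simp [List.count_append, h1, h2, Nat.add_comm]
        · have h1 : run.count x = 0 :=
            List.count_eq_zero.2 (fun hx => hxc (hrun_all x hx))
          simp [List.count_append, h1, hxc, Ne.symm hxc]
      have hdef : pvCollectRuns (c :: rest)
          = if 5 ≤ run.length + 1 then c :: pvCollectRuns rest' else pvCollectRuns rest' := by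
        rw [pvCollectRuns]
      constructor
      · rw [hdef]
        split_ifs with h5
        · refine List.Pairwise.cons ?_ ihp
          intro y hy
          have : 5 ≤ rest'.count y := (ihm y).1 hy
          exact hgt y (List.count_pos_iff.1 (by omega))
        · exact ihp
      · intro x
        rw [hdef, hcount x]
        by_cases hxc : x = c
        · subst hxc
          have h2 : rest'.count x = 0 :=
            List.count_eq_zero.2 (fun hx => lt_irrefl x (hgt x hx))
          rw [if_pos rfl]
          split_ifs with h5
          · simp [h5]
          · simp [ihm, h2, h5]
        · rw [if_neg hxc]
          split_ifs with h5
          · simp [List.mem_cons, hxc, ihm]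
          · exact ihm x

lemma pvCollectRuns_spec (l : List Char) (hs : l.Pairwise (· ≤ ·)) :
    (pvCollectRuns l).Pairwise (· < ·) ∧ (∀ x, x ∈ pvCollectRuns l ↔ 5 ≤ l.count x) :=
  pvCollectRuns_spec_aux l.length l le_rfl hs

-- ===== VERDICT (by name: the statement is the Claim_ definition above) =====
theorem problem_1159_spec : Claim_equal_problem_1159 := by
  intro names _ _
  show problem_1159 names = problem_1159_alt names
  simp only [problem_1159, problem_1159_alt]
  have hcounter :
      names.foldl (fun d name => d.modify (pvFirst name) 0 (· + 1)) PySem.Dict.empty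
        = PySem.Dict.counter (names.map pvFirst) := by
    rw [PySem.Dict.counter_eq_foldl, List.foldl_map]
  rw [hcounter]
  set firsts := names.map pvFirst with hf
  set s := PySem.List.sorted firsts (fun x => x) false with hsdef
  have hs : s.Pairwise (· ≤ ·) := PySem.List.sorted_pairwise firsts (fun x => x)
  obtain ⟨hp, hm⟩ := pvCollectRuns_spec s hs
  have hcnt : ∀ x, s.count x = firsts.count x := fun x =>
    (PySem.List.sorted_perm firsts (fun x => x) false).count_eq x
  set flt := (PySem.Dict.counter firsts).keys.filter
      (fun char => decide ((5 : Int) ≤ (PySem.Dict.counter firsts).getD char 0)) with hfl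
  have hmem : ∀ x, x ∈ flt ↔ 5 ≤ firsts.count x := by
    intro x
    rw [hfl, List.mem_filter]
    constructor
    · rintro ⟨-, hx⟩
      have := of_decide_eq_true hx
      rw [PySem.Dict.getD_counter] at this
      exact_mod_cast this
    · intro hx
      refine ⟨?_, ?_⟩
      · rw [PySem.Dict.keys_counter]
        exact (PySem.Set.mem_ofList _ _).2 (List.count_pos_iff.1 (by omega))
      · exact decide_eq_true (by rw [PySem.Dict.getD_counter]; exact_mod_cast hx)
  have hnodup_flt : flt.Nodup := (PySem.Dict.nodup_keys_counter firsts).filter _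
  have hperm : (pvCollectRuns s).Perm flt := by
    rw [List.perm_ext_iff_of_nodup (hp.imp fun h => ne_of_lt h) hnodup_flt]
    intro a
    rw [hm a, hmem a, hcnt a]
  have hsorted : PySem.List.sorted flt (fun x => x) false = pvCollectRuns s :=
    PySem.List.sorted_eq_of_perm_of_pairwise_lt flt (pvCollectRuns s) (fun x => x) hperm hp
  simp only [hsorted]
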